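-- pv_equiv track=rewrite | github.com/GianpaoloBranca/CAI-Punti-Interesse | punti_interesse/templatetags/pi_template_tags.py | mark_italic
-- ===== SOURCE A (Python) =====
-- def mark_italic(text):
--     output = ''
--     split_t = text.split('**')
--
--     in_i = False
--     counter = 0
--     last = len(split_t) - 1
--
--     for elem in split_t:
--         if in_i:
--             # this means we have an odd number of '**'. Ignores the last one.
--             if counter == last:
--                 output += '**' + elem
--             else:
--                 output += '<i>' + elem + '</i>'
--                 in_i = False
--         else:
--             output += elem
--             in_i = True
--         counter += 1
--     return output
-- ===== SOURCE B (Python) =====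
-- def mark_italic(text):
--     out = []
--     s = text
--     while True:
--         j = s.find('**')
--         if j == -1:
--             out.append(s)
--             return ''.join(out)
--         rest = s[j + 2:]
--         k = rest.find('**')
--         if k == -1:
--             out.append(s)
--             return ''.join(out)
--         out.append(s[:j] + '<i>' + rest[:k] + '</i>')
--         s = rest[k + 2:]
-- ===== Notes on version B (the rewrite author's own statement) =====
-- stated objective: alternative
-- what changed: Replaced A's split-on-'**' list plus alternating in_i/counter state machine by a direct loop that locates each '**'...'**' pair with str.find and wraps the enclosed slice, leaving an unpaired trailing '**' literal.
import Mathlib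
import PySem

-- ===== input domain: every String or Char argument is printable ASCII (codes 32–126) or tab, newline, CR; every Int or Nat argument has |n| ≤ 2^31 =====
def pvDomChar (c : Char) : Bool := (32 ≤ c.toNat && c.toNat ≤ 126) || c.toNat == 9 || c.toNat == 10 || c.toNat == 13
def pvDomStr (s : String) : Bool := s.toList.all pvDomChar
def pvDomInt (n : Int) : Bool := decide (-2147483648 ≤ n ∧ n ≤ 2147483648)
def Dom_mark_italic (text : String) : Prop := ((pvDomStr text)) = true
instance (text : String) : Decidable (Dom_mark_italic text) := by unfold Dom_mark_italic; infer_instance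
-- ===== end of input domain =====

-- B replaces A's split-on-'**' + alternating-flag state machine by a direct loop that finds
-- each '**'…'**' pair with find and wraps its content (objective: alternative).

-- ===== PORT A =====
-- the body of A's for-loop (state = (output, in_i, counter))
def markItalicStep (last : Int) (st : List Char × Bool × Int) (elem : List Char) :
    List Char × Bool × Int :=
  match st with
  | (output, in_i, counter) =>
    if in_i then
      if counter = last then (output ++ ['*', '*'] ++ elem, in_i, counter + 1)
      else (output ++ ['<', 'i', '>'] ++ elem ++ ['<', '/', 'i', '>'], false, counter + 1)
    else (output ++ elem, true, counter + 1)

def mark_italic (text : String) : String :=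
  let split_t := PySem.Chars.splitOn text.toList ['*', '*']
  let last : Int := (split_t.length : Int) - 1
  let st := split_t.foldl (markItalicStep last) ([], false, 0)
  String.ofList st.1

-- ===== PORT B =====
-- termination fact for the while-loop of B (cited by markItalicGo's decreasing_by)
theorem markItalicGo_dec (s : List Char) (j k : Int) (hj : PySem.Chars.find s ['*', '*'] = j)
    (hjne : ¬ j = -1) :
    (PySem.List.slice (PySem.List.slice s (some (j + 2)) none) (some (k + 2)) none).length
      < s.length := by
  have hj0 : 0 ≤ j := by
    have h1 := PySem.Chars.neg_one_le_find s ['*', '*']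
    omega
  have hinf : (['*', '*'] : List Char) <:+: s := by
    by_contra hc
    exact hjne (hj ▸ (PySem.Chars.find_eq_neg_one_iff s ['*', '*']).mpr hc)
  have hlen : 2 ≤ s.length := hinf.length_le
  rw [PySem.List.slice_from _ (by omega : (0:Int) ≤ j + 2), PySem.List.slice_some_none]
  simp only [List.length_drop]
  have h2 : 2 ≤ (j + 2).toNat := by omega
  omega

-- B's while-loop: out = the joined chunks so far, s = the not-yet-scanned suffix
def markItalicGo (out : List (List Char)) (s : List Char) : List Char :=
  let j := PySem.Chars.find s ['*', '*']
  if hj : j = -1 then PySem.Chars.join [] (out ++ [s])          -- ''.join(out) after out.append(s)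
  else
    let rest := PySem.List.slice s (some (j + 2)) none          -- s[j+2:]
    let k := PySem.Chars.find rest ['*', '*']
    if k = -1 then PySem.Chars.join [] (out ++ [s])
    else
      markItalicGo
        (out ++ [PySem.List.slice s none (some j) ++ ['<', 'i', '>'] ++
                 PySem.List.slice rest none (some k) ++ ['<', '/', 'i', '>']])
        (PySem.List.slice rest (some (k + 2)) none)
termination_by s.length
decreasing_by exact markItalicGo_dec s _ _ rfl hj

def mark_italic_alt (text : String) : String :=
  String.ofList (markItalicGo [] text.toList)

-- ===== PRECONDITION & SPEC =====
def Spec_mark_italic (text : String) (out : String) : Prop := out = mark_italic_alt text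
instance (text : String) (out : String) : Decidable (Spec_mark_italic text out) := by unfold Spec_mark_italic; infer_instance

-- ===== CLAIM (what is proved, stated in full; the proofs are below) =====
def Claim_equal_mark_italic : Prop := ∀ (text : String), Dom_mark_italic text → Spec_mark_italic text (mark_italic text)

-- ===== LEMMAS AND PROOFS =====

-- non-accumulator form of B's loop
def wrapPairs (s : List Char) : List Char :=
  if hj : PySem.Chars.find s ['*', '*'] = -1 then s
  else
    let j := (PySem.Chars.find s ['*', '*']).toNat
    let rest := s.drop (j + 2)
    if PySem.Chars.find rest ['*', '*'] = -1 then s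
    else
      let k := (PySem.Chars.find rest ['*', '*']).toNat
      s.take j ++ ['<', 'i', '>'] ++ rest.take k ++ ['<', '/', 'i', '>'] ++
        wrapPairs (rest.drop (k + 2))
termination_by s.length
decreasing_by
  have hinf : (['*', '*'] : List Char) <:+: s := by
    by_contra hc
    exact hj ((PySem.Chars.find_eq_neg_one_iff s ['*', '*']).mpr hc)
  have hlen : 2 ≤ s.length := hinf.length_le
  simp only [List.length_drop]
  omega

theorem join_nil_eq_flatten (parts : List (List Char)) :
    PySem.Chars.join [] parts = parts.flatten := by
  induction parts with
  | nil => simp [PySem.Chars.join, List.intercalate]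
  | cons a t ih =>
    cases t with
    | nil => simp [PySem.Chars.join_singleton]
    | cons b u => rw [PySem.Chars.join_cons_cons, ih]; simp

-- find.go expressed through find
theorem findGo_eq (sub l : List Char) (k : Nat) :
    PySem.Chars.find.go sub l k =
      if PySem.Chars.find l sub = -1 then -1 else PySem.Chars.find l sub + k := by
  induction l generalizing k with
  | nil =>
    by_cases h : sub.isEmpty <;>
      simp [PySem.Chars.find, PySem.Chars.find.go, h]
  | cons c t ih =>
    by_cases hp : sub.isPrefixOf (c :: t) = true
    · simp [PySem.Chars.find, PySem.Chars.find.go, hp]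
    · have hstep : ∀ m : Nat, PySem.Chars.find.go sub (c :: t) m = PySem.Chars.find.go sub t (m + 1) := by
        intro m; rw [PySem.Chars.find.go.eq_def]; simp [hp]
      have hfind : PySem.Chars.find (c :: t) sub =
          if PySem.Chars.find t sub = -1 then -1 else PySem.Chars.find t sub + 1 := by
        show PySem.Chars.find.go sub (c :: t) 0 = _
        rw [hstep 0, ih 1]
        simp
      rw [hstep k, ih (k + 1), hfind]
      have hge := PySem.Chars.neg_one_le_find t sub
      split_ifs with h1 h2 <;> push_cast <;> omega

theorem find_cons (sub : List Char) (c : Char) (t : List Char) :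
    PySem.Chars.find (c :: t) sub =
      if sub.isPrefixOf (c :: t) then 0
      else if PySem.Chars.find t sub = -1 then -1 else PySem.Chars.find t sub + 1 := by
  by_cases hp : sub.isPrefixOf (c :: t) = true
  · simp [PySem.Chars.find, PySem.Chars.find.go, hp]
  · show PySem.Chars.find.go sub (c :: t) 0 = _
    rw [show PySem.Chars.find.go sub (c :: t) 0 = PySem.Chars.find.go sub t 1 by
      rw [PySem.Chars.find.go.eq_def]; simp [hp]]
    rw [findGo_eq]
    simp [hp]

theorem find_nil_star : PySem.Chars.find [] ['*', '*'] = -1 := by decide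

-- the fuel-free shape of PySem.Chars.splitOn.go for sep = "**"
def spl (l cur : List Char) : List (List Char) :=
  if (['*', '*'] : List Char).isPrefixOf l then cur.reverse :: spl (l.drop 2) []
  else
    match l with
    | [] => [cur.reverse]
    | c :: rest => spl rest (c :: cur)
termination_by l.length
decreasing_by
  · have h2 : 2 ≤ l.length := by
      have := (List.isPrefixOf_iff_prefix.mp (by assumption :
        (['*', '*'] : List Char).isPrefixOf l = true)).length_le
      simpa using this
    simp only [List.length_drop]; omega
  · simp

theorem splitOn_go_eq_spl : ∀ (fuel : Nat) (l cur : List Char) (acc : List (List Char)),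
    l.length < fuel →
    PySem.Chars.splitOn.go ['*', '*'] fuel l cur acc = acc.reverse ++ spl l cur := by
  intro fuel
  induction fuel with
  | zero => intro l cur acc h; omega
  | succ fuel ih =>
    intro l cur acc h
    match l with
    | [] =>
      rw [PySem.Chars.splitOn.go.eq_def, spl.eq_def]
      simp
    | c :: rest =>
      by_cases hp : (['*', '*'] : List Char).isPrefixOf (c :: rest) = true
      · have h2 : 2 ≤ (c :: rest).length := by
          have := (List.isPrefixOf_iff_prefix.mp hp).length_le
          simpa using this
        rw [PySem.Chars.splitOn.go.eq_def]
        simp only [hp, if_true]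
        rw [ih _ _ _ (by simp only [List.length_drop, List.length_cons] at h ⊢; omega)]
        conv_rhs => rw [spl.eq_def]
        simp [hp, List.reverse_cons, List.append_assoc]
      · rw [PySem.Chars.splitOn.go.eq_def]
        simp only [hp, if_false]
        rw [ih rest (c :: cur) acc (by simp only [List.length_cons] at h; omega)]
        conv_rhs => rw [spl.eq_def]
        simp [hp]

theorem splitOn_eq_spl (s : List Char) :
    PySem.Chars.splitOn s ['*', '*'] = spl s [] := by
  show PySem.Chars.splitOn.go ['*', '*'] (s.length + 1) s [] [] = _
  rw [splitOn_go_eq_spl (s.length + 1) s [] [] (by omega)]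
  simp

theorem spl_of_find_neg : ∀ (l : List Char), PySem.Chars.find l ['*', '*'] = -1 →
    ∀ cur, spl l cur = [cur.reverse ++ l] := by
  intro l
  induction l with
  | nil =>
    intro _ cur
    rw [spl.eq_def]
    simp
  | cons c t ih =>
    intro h cur
    have hni : ¬ (['*', '*'] : List Char) <:+: (c :: t) :=
      (PySem.Chars.find_eq_neg_one_iff _ _).mp h
    have hp : ¬ (['*', '*'] : List Char).isPrefixOf (c :: t) = true := by
      intro hp
      exact hni (List.isPrefixOf_iff_prefix.mp hp).isInfix
    have ht : PySem.Chars.find t ['*', '*'] = -1 :=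
      (PySem.Chars.find_eq_neg_one_iff _ _).mpr
        (fun hi => hni (hi.trans (List.suffix_cons c t).isInfix))
    rw [spl.eq_def]
    simp only [hp, if_false]
    rw [ih ht (c :: cur)]
    simp

theorem spl_of_find_nat : ∀ (j : Nat) (l : List Char),
    PySem.Chars.find l ['*', '*'] = (j : Int) →
    ∀ cur, spl l cur = (cur.reverse ++ l.take j) :: spl (l.drop (j + 2)) [] := by
  intro j
  induction j with
  | zero =>
    intro l h cur
    match l with
    | [] => rw [find_nil_star] at h; omega
    | c :: t =>
      rw [find_cons] at h
      have hp : (['*', '*'] : List Char).isPrefixOf (c :: t) = true := by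
        by_contra hp
        simp only [hp, if_false] at h
        have hge := PySem.Chars.neg_one_le_find t ['*', '*']
        split_ifs at h <;> omega
      rw [spl.eq_def]
      simp [hp]
  | succ j ih =>
    intro l h cur
    match l with
    | [] => rw [find_nil_star] at h; omega
    | c :: t =>
      rw [find_cons] at h
      have hp : ¬ (['*', '*'] : List Char).isPrefixOf (c :: t) = true := by
        intro hp
        simp only [hp, if_true] at h
        omega
      simp only [hp, if_false] at h
      have hge := PySem.Chars.neg_one_le_find t ['*', '*']
      have ht : PySem.Chars.find t ['*', '*'] = (j : Int) := by
        split_ifs at h <;> push_cast at h ⊢ <;> omega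
      rw [spl.eq_def]
      simp only [hp, if_false]
      rw [ih t ht (c :: cur)]
      simp [List.take_succ_cons, List.drop_succ_cons]

theorem spl_ne_nil (l cur : List Char) : spl l cur ≠ [] := by
  by_cases h : PySem.Chars.find l ['*', '*'] = -1
  · rw [spl_of_find_neg l h cur]; simp
  · have hge := PySem.Chars.neg_one_le_find l ['*', '*']
    have h0 : 0 ≤ PySem.Chars.find l ['*', '*'] := by omega
    have hj : PySem.Chars.find l ['*', '*'] = ((PySem.Chars.find l ['*', '*']).toNat : Int) :=
      (Int.toNat_of_nonneg h0).symm
    rw [spl_of_find_nat _ l hj cur]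
    simp

theorem find_prefix (s : List Char) (j : Nat)
    (h : PySem.Chars.find s ['*', '*'] = (j : Int)) :
    (['*', '*'] : List Char) <+: s.drop j := by
  have hne : PySem.Chars.findFrom s ['*', '*'] ((0 : Nat) : Int) ≠ -1 := by
    rw [show (((0 : Nat) : Int)) = 0 by simp, PySem.Chars.findFrom_zero, h]
    omega
  obtain ⟨-, hpre, -⟩ :=
    PySem.Chars.findFrom_natCast_spec s ['*', '*'] 0 (Nat.zero_le _) hne
  rw [show (((0 : Nat) : Int)) = 0 by simp, PySem.Chars.findFrom_zero, h] at hpre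
  simpa using hpre

-- A's loop carried out over the parts list
def joinParts : List (List Char) → List Char
  | [] => []
  | [p] => p
  | [p, q] => p ++ ['*', '*'] ++ q
  | p :: q :: t => p ++ ['<', 'i', '>'] ++ q ++ ['<', '/', 'i', '>'] ++ joinParts t

theorem foldl_step_eq_joinParts :
    ∀ (parts : List (List Char)) (out : List Char) (counter last : Int),
    last = counter + parts.length - 1 →
    (parts.foldl (markItalicStep last) (out, false, counter)).1 = out ++ joinParts parts := by
  intro parts
  induction parts using joinParts.induct with
  | case1 => intro out counter last h; simp [joinParts]
  | case2 p => intro out counter last h; simp [joinParts, markItalicStep]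
  | case3 p q =>
    intro out counter last h
    have hlast : counter + 1 = last := by simp at h; omega
    simp [joinParts, markItalicStep, hlast]
  | case4 p q t ht ih =>
    intro out counter last h
    have htlen : 1 ≤ t.length := by
      cases t with
      | nil => exact absurd rfl ht
      | cons x xs => simp
    have hne : ¬ (counter + 1 = last) := by
      simp at h; omega
    simp only [List.foldl_cons]
    rw [show markItalicStep last (out, false, counter) p = (out ++ p, true, counter + 1) from by
      simp [markItalicStep]]
    rw [show markItalicStep last (out ++ p, true, counter + 1) q =
        (out ++ p ++ ['<', 'i', '>'] ++ q ++ ['<', '/', 'i', '>'], false, counter + 1 + 1) from by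
      simp [markItalicStep, hne]]
    rw [ih _ _ _ (by simp only [List.length_cons] at h; omega)]
    have hj : joinParts (p :: q :: t) =
        p ++ ['<', 'i', '>'] ++ q ++ ['<', '/', 'i', '>'] ++ joinParts t := by
      cases t with
      | nil => exact absurd rfl ht
      | cons x xs => simp [joinParts]
    rw [hj]
    simp [List.append_assoc]

theorem joinParts_spl_eq_wrapPairs : ∀ (n : Nat) (s : List Char), s.length = n →
    joinParts (spl s []) = wrapPairs s := by
  intro n
  induction n using Nat.strong_induction_on with
  | _ n ih =>
    intro s hn
    by_cases hj : PySem.Chars.find s ['*', '*'] = -1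
    · rw [spl_of_find_neg s hj []]
      rw [wrapPairs.eq_def]
      simp [hj, joinParts]
    · have hge := PySem.Chars.neg_one_le_find s ['*', '*']
      have h0 : 0 ≤ PySem.Chars.find s ['*', '*'] := by omega
      set jn : Nat := (PySem.Chars.find s ['*', '*']).toNat with hjn
      have hjeq : PySem.Chars.find s ['*', '*'] = (jn : Int) := (Int.toNat_of_nonneg h0).symm
      have hpre := find_prefix s jn hjeq
      obtain ⟨tl, htl⟩ := hpre
      have hdd : List.drop 2 (List.drop jn s) = List.drop (jn + 2) s := by
        rw [List.drop_drop]
      have htl2 : List.drop 2 (List.drop jn s) = tl := by rw [← htl]; rfl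
      have htl' : List.drop (jn + 2) s = tl := by rw [← hdd]; exact htl2
      have hsplit : s = s.take jn ++ ['*', '*'] ++ s.drop (jn + 2) := by
        conv_lhs => rw [← List.take_append_drop jn s, ← htl, ← htl']
        simp [List.append_assoc]
      rw [spl_of_find_nat jn s hjeq []]
      by_cases hk : PySem.Chars.find (s.drop (jn + 2)) ['*', '*'] = -1
      · rw [spl_of_find_neg _ hk []]
        conv_rhs => rw [wrapPairs.eq_def]
        simp only [dif_neg hj, ← hjn, hk, if_true]
        simp only [joinParts, List.reverse_nil, List.nil_append]
        conv_rhs => rw [hsplit]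
      · have hge2 := PySem.Chars.neg_one_le_find (s.drop (jn + 2)) ['*', '*']
        have h02 : 0 ≤ PySem.Chars.find (s.drop (jn + 2)) ['*', '*'] := by omega
        set kn : Nat := (PySem.Chars.find (s.drop (jn + 2)) ['*', '*']).toNat with hkn
        have hkeq : PySem.Chars.find (s.drop (jn + 2)) ['*', '*'] = (kn : Int) :=
          (Int.toNat_of_nonneg h02).symm
        rw [spl_of_find_nat kn _ hkeq []]
        obtain ⟨x, xs, hxx⟩ :=
          List.exists_cons_of_ne_nil (spl_ne_nil ((s.drop (jn + 2)).drop (kn + 2)) [])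
        rw [hxx]
        have hjoin : joinParts ((List.nil.reverse ++ s.take jn) ::
            (List.nil.reverse ++ (s.drop (jn + 2)).take kn) :: x :: xs) =
            s.take jn ++ ['<', 'i', '>'] ++ (s.drop (jn + 2)).take kn ++ ['<', '/', 'i', '>'] ++
              joinParts (x :: xs) := by
          simp [joinParts]
        rw [hjoin, ← hxx]
        have hlen2 : 2 ≤ s.length := by
          have hinf : (['*', '*'] : List Char) <:+: s := by
            by_contra hc
            exact hj ((PySem.Chars.find_eq_neg_one_iff s ['*', '*']).mpr hc)
          exact hinf.length_le
        have hrec := ih ((s.drop (jn + 2)).drop (kn + 2)).length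
          (by simp only [List.length_drop]; omega) ((s.drop (jn + 2)).drop (kn + 2)) rfl
        rw [hrec]
        conv_rhs => rw [wrapPairs.eq_def]
        simp only [dif_neg hj, ← hjn, hk, if_false, ← hkn]

-- B's accumulator loop against the pure form
theorem markItalicGo_eq_wrapPairs : ∀ (n : Nat) (s : List Char), s.length = n →
    ∀ out, markItalicGo out s = out.flatten ++ wrapPairs s := by
  intro n
  induction n using Nat.strong_induction_on with
  | _ n ih =>
    intro s hn out
    by_cases hj : PySem.Chars.find s ['*', '*'] = -1
    · rw [markItalicGo.eq_def, wrapPairs.eq_def]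
      simp [hj, join_nil_eq_flatten]
    · have hge := PySem.Chars.neg_one_le_find s ['*', '*']
      have h0 : 0 ≤ PySem.Chars.find s ['*', '*'] := by omega
      have hslice_rest : PySem.List.slice s (some (PySem.Chars.find s ['*', '*'] + 2)) none =
          s.drop ((PySem.Chars.find s ['*', '*']).toNat + 2) := by
        rw [PySem.List.slice_from _ (by omega : (0:Int) ≤ PySem.Chars.find s ['*', '*'] + 2)]
        congr 1
        omega
      by_cases hk : PySem.Chars.find (s.drop ((PySem.Chars.find s ['*', '*']).toNat + 2))
          ['*', '*'] = -1
      · rw [markItalicGo.eq_def, wrapPairs.eq_def]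
        simp only [hslice_rest, hj, hk, dif_neg hj, if_true, dite_false]
        simp [join_nil_eq_flatten, hk]
      · have hge2 := PySem.Chars.neg_one_le_find
          (s.drop ((PySem.Chars.find s ['*', '*']).toNat + 2)) ['*', '*']
        have h02 : 0 ≤ PySem.Chars.find
            (s.drop ((PySem.Chars.find s ['*', '*']).toNat + 2)) ['*', '*'] := by omega
        have hlen2 : 2 ≤ s.length := by
          have hinf : (['*', '*'] : List Char) <:+: s := by
            by_contra hc
            exact hj ((PySem.Chars.find_eq_neg_one_iff s ['*', '*']).mpr hc)
          exact hinf.length_le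
        rw [markItalicGo.eq_def, wrapPairs.eq_def]
        simp only [hslice_rest, hj, hk, dif_neg hj, if_false, dite_false]
        have hslice_take : PySem.List.slice s none (some (PySem.Chars.find s ['*', '*'])) =
            s.take (PySem.Chars.find s ['*', '*']).toNat := PySem.List.slice_to _ h0
        have hslice_take2 : PySem.List.slice
            (s.drop ((PySem.Chars.find s ['*', '*']).toNat + 2)) none
            (some (PySem.Chars.find (s.drop ((PySem.Chars.find s ['*', '*']).toNat + 2)) ['*', '*'])) =
            (s.drop ((PySem.Chars.find s ['*', '*']).toNat + 2)).take
              (PySem.Chars.find (s.drop ((PySem.Chars.find s ['*', '*']).toNat + 2)) ['*', '*']).toNat :=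
          PySem.List.slice_to _ h02
        have hslice_rec : PySem.List.slice
            (s.drop ((PySem.Chars.find s ['*', '*']).toNat + 2))
            (some (PySem.Chars.find (s.drop ((PySem.Chars.find s ['*', '*']).toNat + 2)) ['*', '*'] + 2)) none =
            (s.drop ((PySem.Chars.find s ['*', '*']).toNat + 2)).drop
              ((PySem.Chars.find (s.drop ((PySem.Chars.find s ['*', '*']).toNat + 2)) ['*', '*']).toNat + 2) := by
          rw [PySem.List.slice_from _ (by omega)]
          congr 1
          omega
        rw [hslice_take, hslice_take2, hslice_rec]
        rw [ih _ (by simp only [List.length_drop]; omega) _ rfl _]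
        simp [List.append_assoc]

-- ===== VERDICT (by name: the statement is the Claim_ definition above) =====
theorem mark_italic_spec : Claim_equal_mark_italic := by
  intro text _
  show mark_italic text = mark_italic_alt text
  unfold mark_italic mark_italic_alt
  simp only []
  rw [splitOn_eq_spl]
  rw [foldl_step_eq_joinParts (spl text.toList []) [] 0 _ (by ring)]
  rw [joinParts_spl_eq_wrapPairs (text.toList.length) text.toList rfl]
  rw [markItalicGo_eq_wrapPairs (text.toList.length) text.toList rfl []]
  simp
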